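-- pv_equiv track=rewrite | github.com/clifton/twag | scripts/roadmap_entropy.py | classify_file
-- ===== SOURCE A (Python) =====
-- SUBSYSTEMS = [
--     "twag/cli",
--     "twag/db",
--     "twag/fetcher",
--     "twag/processor",
--     "twag/scorer",
--     "twag/web",
--     "twag/models",
-- ]
--
-- TOP_LEVEL_MODULES = [
--     "twag/auth.py",
--     "twag/config.py",
--     "twag/notifier.py",
--     "twag/renderer.py",
--     "twag/tables.py",
--     "twag/media.py",
--     "twag/link_utils.py",
--     "twag/text_utils.py",
--     "twag/metrics.py",
--     "twag/article_visuals.py",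
--     "twag/article_sections.py",
-- ]
--
-- def classify_file(path: str) -> str | None:
--     """Map a file path to a subsystem name, or None if outside twag/."""
--     for sub in SUBSYSTEMS:
--         if path.startswith(sub + "/") or path == sub:
--             return sub
--     for mod in TOP_LEVEL_MODULES:
--         if path == mod:
--             return mod
--     if path.startswith("twag/"):
--         return "twag/other"
--     if path.startswith("tests/"):
--         return "tests"
--     if path.startswith("scripts/"):
--         return "scripts"
--     return "root"
-- ===== SOURCE B (Python) =====
-- _SUBSYSTEMS = frozenset({
--     "twag/cli", "twag/db", "twag/fetcher", "twag/processor",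
--     "twag/scorer", "twag/web", "twag/models",
-- })
--
-- _MODULES = frozenset({
--     "twag/auth.py", "twag/config.py", "twag/notifier.py", "twag/renderer.py",
--     "twag/tables.py", "twag/media.py", "twag/link_utils.py", "twag/text_utils.py",
--     "twag/metrics.py", "twag/article_visuals.py", "twag/article_sections.py",
-- })
--
--
-- def classify_file(path: str) -> str | None:
--     """Map a file path to a subsystem name, or None if outside twag/."""
--     first = path.find("/")
--     second = path.find("/", first + 1)
--     head = path if second == -1 else path[:second]
--     if head in _SUBSYSTEMS:
--         return head
--     if path in _MODULES:
--         return path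
--     if path.startswith("twag/"):
--         return "twag/other"
--     if path.startswith("tests/"):
--         return "tests"
--     if path.startswith("scripts/"):
--         return "scripts"
--     return "root"
-- ===== Notes on version B (the rewrite author's own statement) =====
-- stated objective: alternative
-- what changed: Replaces the linear startswith-scan over SUBSYSTEMS (building sub+"/" for each candidate) by deriving the path's first-two-components head once via find/slice and doing a single set lookup of that derived key, with set membership replacing the equality loop over TOP_LEVEL_MODULES.
import Mathlib
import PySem

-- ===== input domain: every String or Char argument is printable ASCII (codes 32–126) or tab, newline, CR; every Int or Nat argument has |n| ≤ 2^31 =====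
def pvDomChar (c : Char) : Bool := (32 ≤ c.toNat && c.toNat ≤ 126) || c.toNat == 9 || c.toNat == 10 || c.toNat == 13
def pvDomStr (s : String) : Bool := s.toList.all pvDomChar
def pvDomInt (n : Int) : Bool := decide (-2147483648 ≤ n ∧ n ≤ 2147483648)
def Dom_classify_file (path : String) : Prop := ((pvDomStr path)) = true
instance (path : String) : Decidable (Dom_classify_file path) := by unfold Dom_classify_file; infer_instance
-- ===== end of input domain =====

-- B replaces A's startswith-scan over SUBSYSTEMS by one derived head key ('/'-prefix up to
-- the second slash) looked up in a set, and the module equality loop by a set lookup (alternative).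

-- ===== PORT A =====
def pvSubsystems : List String :=
  ["twag/cli", "twag/db", "twag/fetcher", "twag/processor", "twag/scorer", "twag/web", "twag/models"]

def pvTopLevelModules : List String :=
  ["twag/auth.py", "twag/config.py", "twag/notifier.py", "twag/renderer.py", "twag/tables.py",
   "twag/media.py", "twag/link_utils.py", "twag/text_utils.py", "twag/metrics.py",
   "twag/article_visuals.py", "twag/article_sections.py"]

-- 'for sub in SUBSYSTEMS: if path.startswith(sub + "/") or path == sub: return sub'
def pvSubsLoop (path : String) : List String → Option String
  | [] => none
  | sub :: rest =>
    if PySem.Str.startswith path (sub ++ "/") || path == sub then some sub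
    else pvSubsLoop path rest

-- 'for mod in TOP_LEVEL_MODULES: if path == mod: return mod'
def pvModsLoop (path : String) : List String → Option String
  | [] => none
  | m :: rest => if path == m then some m else pvModsLoop path rest

def classify_file (path : String) : Option String :=
  match pvSubsLoop path pvSubsystems with
  | some sub => some sub
  | none =>
    match pvModsLoop path pvTopLevelModules with
    | some m => some m
    | none =>
      if PySem.Str.startswith path "twag/" then some "twag/other"
      else if PySem.Str.startswith path "tests/" then some "tests"
      else if PySem.Str.startswith path "scripts/" then some "scripts"
      else some "root"

-- ===== PORT B =====
def pvSubsystemSet : PySem.Set String :=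
  PySem.Set.ofList
    ["twag/cli", "twag/db", "twag/fetcher", "twag/processor", "twag/scorer", "twag/web", "twag/models"]

def pvModuleSet : PySem.Set String :=
  PySem.Set.ofList
    ["twag/auth.py", "twag/config.py", "twag/notifier.py", "twag/renderer.py", "twag/tables.py",
     "twag/media.py", "twag/link_utils.py", "twag/text_utils.py", "twag/metrics.py",
     "twag/article_visuals.py", "twag/article_sections.py"]

-- head = path up to (excluding) the second '/', or the whole path if there is no second '/'
def pvHead (path : String) : String :=
  let first := PySem.Str.find path "/"
  let second := PySem.Str.findFrom path "/" (first + 1)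
  if second == -1 then path else PySem.Str.slice path none (some second)

def classify_file_alt (path : String) : Option String :=
  let head := pvHead path
  if pvSubsystemSet.contains head then some head
  else if pvModuleSet.contains path then some path
  else if PySem.Str.startswith path "twag/" then some "twag/other"
  else if PySem.Str.startswith path "tests/" then some "tests"
  else if PySem.Str.startswith path "scripts/" then some "scripts"
  else some "root"

-- ===== PRECONDITION & SPEC =====
def Spec_classify_file (path : String) (out : Option String) : Prop := out = classify_file_alt path
instance (path : String) (out : Option String) : Decidable (Spec_classify_file path out) := by unfold Spec_classify_file; infer_instance

-- ===== CLAIM (what is proved, stated in full; the proofs are below) =====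
def Claim_equal_classify_file : Prop := ∀ (path : String), Dom_classify_file path → Spec_classify_file path (classify_file path)

-- ===== LEMMAS AND PROOFS =====

-- a first-slash decomposition is unique
lemma pv_slash_split_unique (a b c d : List Char) (ha : '/' ∉ a) (hc : '/' ∉ c)
    (h : a ++ '/' :: b = c ++ '/' :: d) : a = c ∧ b = d := by
  induction a generalizing c with
  | nil =>
    cases c with
    | nil => simpa using h
    | cons x xs => simp at h; exact absurd (h.1 ▸ List.mem_cons_self) hc
  | cons x xs ih =>
    cases c with
    | nil => simp at h; exact absurd (h.1 ▸ List.mem_cons_self) ha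
    | cons y ys =>
      simp only [List.cons_append, List.cons.injEq] at h
      have := ih (fun hm => ha (List.mem_cons_of_mem _ hm)) (c := ys)
        (fun hm => hc (h.1 ▸ List.mem_cons_of_mem _ hm)) h.2
      exact ⟨by rw [h.1, this.1], this.2⟩

-- every list with a slash has a first-slash decomposition
lemma pv_first_slash (l : List Char) (h : '/' ∈ l) :
    ∃ c d, l = c ++ '/' :: d ∧ '/' ∉ c := by
  induction l with
  | nil => simp at h
  | cons x xs ih =>
    by_cases hx : x = '/'
    · exact ⟨[], xs, by simp [hx], by simp⟩
    · have hxs : '/' ∈ xs := by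
        rcases List.mem_cons.1 h with h' | h'
        · exact absurd h'.symm hx
        · exact h'
      obtain ⟨c, d, hcd, hc⟩ := ih hxs
      exact ⟨x :: c, d, by simp [hcd], by simp [List.mem_cons, hc, Ne.symm hx]⟩

-- a singleton ['/'] is an infix iff '/' is a member
lemma pv_singleton_infix (l : List Char) : ['/'] <:+: l ↔ '/' ∈ l := by
  constructor
  · rintro ⟨s, t, rfl⟩; simp
  · intro h
    obtain ⟨c, d, rfl, -⟩ := pv_first_slash l h
    exact ⟨c, d, by simp⟩

-- find finds the first slash
lemma pv_find_slash (a r : List Char) (ha : '/' ∉ a) :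
    PySem.Chars.find (a ++ '/' :: r) ['/'] = (a.length : Int) := by
  have hinf : ['/'] <:+: a ++ '/' :: r := ⟨a, r, by simp⟩
  have h0 : 0 ≤ PySem.Chars.find (a ++ '/' :: r) ['/'] :=
    (PySem.Chars.find_nonneg_iff _ _).2 hinf
  obtain ⟨hpre, hmin⟩ := PySem.Chars.find_spec h0
  set t := (PySem.Chars.find (a ++ '/' :: r) ['/']).toNat with ht
  have htle : ¬ t < a.length := by
    intro hlt
    rw [List.drop_append_of_le_length (le_of_lt hlt), List.cons_prefix_iff] at hpre
    obtain ⟨l', hl', -⟩ := hpre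
    have : (a.drop t) ≠ [] := by simp [List.drop_eq_nil_iff]; omega
    have hhead : a[t] = '/' := by
      have := congrArg (·.head?) hl'
      simpa [List.head?_drop, List.getElem?_eq_getElem hlt] using this
    exact ha (hhead ▸ List.getElem_mem hlt)
  have hge : ¬ a.length < t := by
    intro hlt
    exact hmin a.length hlt (by simp [List.drop_append_of_le_length (le_refl a.length)])
  have : t = a.length := by omega
  omega

-- the key equivalence: B's derived head equals s  ↔  A's per-subsystem test fires,
-- for any s that consists of exactly two slash-free components
lemma pv_head_eq_iff (path s : String) (a b : List Char)
    (hs : s.toList = a ++ '/' :: b) (ha : '/' ∉ a) (hb : '/' ∉ b) :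
    (pvHead path = s) ↔ (PySem.Str.startswith path (s ++ "/") || path == s) = true := by
  have hslash : ('/' : Char) ∈ s.toList := by rw [hs]; simp
  have hsw : PySem.Str.startswith path (s ++ "/") = true ↔
      (a ++ '/' :: b ++ ['/']) <+: path.toList := by
    rw [PySem.Str.startswith_eq, PySem.Chars.startswith_iff, String.toList_append, hs]
    have : ("/" : String).toList = ['/'] := rfl
    rw [this]
  have hbeq : (path == s) = true ↔ path.toList = a ++ '/' :: b := by
    rw [beq_iff_eq, String.ext_iff, hs]
  unfold pvHead
  simp only [PySem.Str.find_eq, PySem.Str.findFrom_eq]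
  have hsl : ("/" : String).toList = ['/'] := rfl
  rw [hsl]
  by_cases hmem : ('/' : Char) ∈ path.toList
  · obtain ⟨c, d, hp, hc⟩ := pv_first_slash path.toList hmem
    have hfind : PySem.Chars.find path.toList ['/'] = (c.length : Int) := by
      rw [hp]; exact pv_find_slash c d hc
    have hlen : path.toList.length = c.length + 1 + d.length := by rw [hp]; simp; omega
    have hk : c.length + 1 ≤ path.toList.length := by omega
    have hcast : PySem.Chars.find path.toList ['/'] + 1 = ((c.length + 1 : Nat) : Int) := by
      rw [hfind]; push_cast; ring
    have hdrop : path.toList.drop (c.length + 1) = d := by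
      rw [hp]
      have : c ++ '/' :: d = (c ++ ['/']) ++ d := by simp
      rw [this]
      have hl : (c ++ ['/']).length = c.length + 1 := by simp
      rw [← hl, List.drop_left]
    rw [hcast, PySem.Chars.findFrom_natCast _ _ _ hk, hdrop]
    by_cases hd : ('/' : Char) ∈ d
    · obtain ⟨e, f, hd2, he⟩ := pv_first_slash d hd
      have hfd : PySem.Chars.find d ['/'] = (e.length : Int) := by
        rw [hd2]; exact pv_find_slash e f he
      have hne : PySem.Chars.find d ['/'] ≠ -1 := by rw [hfd]; omega
      rw [if_neg hne, hfd]
      have h2 : ((c.length + 1 : Nat) : Int) + (e.length : Int) =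
          ((c.length + 1 + e.length : Nat) : Int) := by push_cast; ring
      rw [h2]
      have hnneg : ¬ ((((c.length + 1 + e.length : Nat) : Int) == -1) = true) := by
        simp only [beq_iff_eq]; omega
      rw [if_neg hnneg]
      -- head = path[:second] = c ++ '/' :: e
      have hhead : (PySem.Str.slice path none (some ((c.length + 1 + e.length : Nat) : Int))).toList
          = c ++ '/' :: e := by
        rw [PySem.Str.toList_slice, PySem.Chars.slice_eq_listSlice,
          PySem.List.slice_to_natCast]
        rw [hp, hd2]
        have : c ++ '/' :: (e ++ '/' :: f) = (c ++ '/' :: e) ++ '/' :: f := by simp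
        rw [this]
        have hl : (c ++ '/' :: e).length = c.length + 1 + e.length := by simp; omega
        rw [← hl, List.take_left]
      constructor
      · intro hEq
        have : c ++ '/' :: e = a ++ '/' :: b := by rw [← hhead, String.ext_iff.1 hEq, hs]
        obtain ⟨hca, heb⟩ := pv_slash_split_unique c e a b hc ha this
        refine Bool.or_eq_true_iff.2 (Or.inl (hsw.2 ?_))
        refine ⟨f, ?_⟩
        rw [hp, hd2, ← hca, ← heb]; simp
      · intro hcond
        rcases Bool.or_eq_true_iff.1 hcond with hsw' | hbq
        · obtain ⟨t, ht⟩ := hsw.1 hsw'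
          rw [hp] at ht
          have ht' : a ++ '/' :: (b ++ '/' :: t) = c ++ '/' :: d := by
            rw [← ht]; simp
          obtain ⟨hac, hbd⟩ := pv_slash_split_unique a (b ++ '/' :: t) c d ha hc ht'
          rw [hd2] at hbd
          obtain ⟨hbe, -⟩ := pv_slash_split_unique b t e f hb he hbd
          rw [String.ext_iff, hhead, hs, hac, hbe]
        · exfalso
          have hps := hbeq.1 hbq
          rw [hp] at hps
          obtain ⟨-, hdb⟩ := pv_slash_split_unique c d a b hc ha hps
          exact hb (hdb ▸ hd)
    · have hfd : PySem.Chars.find d ['/'] = -1 :=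
        (PySem.Chars.find_eq_neg_one_iff _ _).2 (fun h => hd ((pv_singleton_infix _).1 h))
      rw [if_pos hfd]
      have : ((-1 : Int) == -1) = true := by decide
      rw [this, if_pos rfl]
      constructor
      · intro hEq
        exact Bool.or_eq_true_iff.2 (Or.inr (hbeq.2 (by rw [String.ext_iff, hs] at hEq; exact hEq)))
      · intro hcond
        rcases Bool.or_eq_true_iff.1 hcond with hsw' | hbq
        · exfalso
          obtain ⟨t, ht⟩ := hsw.1 hsw'
          rw [hp] at ht
          have ht' : a ++ '/' :: (b ++ '/' :: t) = c ++ '/' :: d := by rw [← ht]; simp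
          obtain ⟨-, hbd⟩ := pv_slash_split_unique a (b ++ '/' :: t) c d ha hc ht'
          exact hd (by rw [← hbd]; simp)
        · rw [String.ext_iff, hs]; exact hbeq.1 hbq
  · have hfind : PySem.Chars.find path.toList ['/'] = -1 :=
      (PySem.Chars.find_eq_neg_one_iff _ _).2 (fun h => hmem ((pv_singleton_infix _).1 h))
    rw [hfind]
    have h0 : (-1 : Int) + 1 = 0 := by ring
    rw [h0, PySem.Chars.findFrom_zero, hfind]
    have : ((-1 : Int) == -1) = true := by decide
    rw [this, if_pos rfl]
    constructor
    · intro hEq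
      exact absurd (by rw [hEq]; exact hslash) hmem
    · intro hcond
      exfalso
      rcases Bool.or_eq_true_iff.1 hcond with hsw' | hbq
      · obtain ⟨t, ht⟩ := hsw.1 hsw'
        exact hmem (by rw [← ht]; simp)
      · exact hmem (by rw [hbeq.1 hbq]; simp)

lemma pv_modsLoop_eq (p : String) (l : List String) :
    pvModsLoop p l = if l.contains p then some p else none := by
  induction l with
  | nil => simp [pvModsLoop]
  | cons m rest ih =>
    by_cases h : p = m
    · simp [pvModsLoop, h]
    · simp [pvModsLoop, ih, beq_iff_eq, h]

-- ===== VERDICT (by name: the statement is the Claim_ definition above) =====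
theorem classify_file_spec : Claim_equal_classify_file := by
  intro path _
  unfold Spec_classify_file
  have h1 := pv_head_eq_iff path "twag/cli" "twag".toList "cli".toList rfl (by decide) (by decide)
  have h2 := pv_head_eq_iff path "twag/db" "twag".toList "db".toList rfl (by decide) (by decide)
  have h3 := pv_head_eq_iff path "twag/fetcher" "twag".toList "fetcher".toList rfl (by decide) (by decide)
  have h4 := pv_head_eq_iff path "twag/processor" "twag".toList "processor".toList rfl (by decide) (by decide)
  have h5 := pv_head_eq_iff path "twag/scorer" "twag".toList "scorer".toList rfl (by decide) (by decide)
  have h6 := pv_head_eq_iff path "twag/web" "twag".toList "web".toList rfl (by decide) (by decide)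
  have h7 := pv_head_eq_iff path "twag/models" "twag".toList "models".toList rfl (by decide) (by decide)
  have hset : pvSubsystemSet =
      ["twag/cli", "twag/db", "twag/fetcher", "twag/processor", "twag/scorer", "twag/web",
       "twag/models"] := rfl
  have hmset : pvModuleSet =
      ["twag/auth.py", "twag/config.py", "twag/notifier.py", "twag/renderer.py", "twag/tables.py",
       "twag/media.py", "twag/link_utils.py", "twag/text_utils.py", "twag/metrics.py",
       "twag/article_visuals.py", "twag/article_sections.py"] := rfl
  show classify_file path = classify_file_alt path
  unfold classify_file classify_file_alt
  simp only [pvSubsystems, pvSubsLoop]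
  by_cases e1 : pvHead path = "twag/cli"
  · have c1 := h1.1 e1
    simp at c1
    simp [c1, e1, hset]
  have n1 : ¬ ((PySem.Str.startswith path ("twag/cli" ++ "/") || path == "twag/cli") = true) := fun hh => e1 (h1.2 hh)
  simp [not_or] at n1
  by_cases e2 : pvHead path = "twag/db"
  · have c2 := h2.1 e2
    simp at c2
    simp [n1, c2, e2, hset]
  have n2 : ¬ ((PySem.Str.startswith path ("twag/db" ++ "/") || path == "twag/db") = true) := fun hh => e2 (h2.2 hh)
  simp [not_or] at n2
  by_cases e3 : pvHead path = "twag/fetcher"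
  · have c3 := h3.1 e3
    simp at c3
    simp [n1, n2, c3, e3, hset]
  have n3 : ¬ ((PySem.Str.startswith path ("twag/fetcher" ++ "/") || path == "twag/fetcher") = true) := fun hh => e3 (h3.2 hh)
  simp [not_or] at n3
  by_cases e4 : pvHead path = "twag/processor"
  · have c4 := h4.1 e4
    simp at c4
    simp [n1, n2, n3, c4, e4, hset]
  have n4 : ¬ ((PySem.Str.startswith path ("twag/processor" ++ "/") || path == "twag/processor") = true) := fun hh => e4 (h4.2 hh)
  simp [not_or] at n4
  by_cases e5 : pvHead path = "twag/scorer"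
  · have c5 := h5.1 e5
    simp at c5
    simp [n1, n2, n3, n4, c5, e5, hset]
  have n5 : ¬ ((PySem.Str.startswith path ("twag/scorer" ++ "/") || path == "twag/scorer") = true) := fun hh => e5 (h5.2 hh)
  simp [not_or] at n5
  by_cases e6 : pvHead path = "twag/web"
  · have c6 := h6.1 e6
    simp at c6
    simp [n1, n2, n3, n4, n5, c6, e6, hset]
  have n6 : ¬ ((PySem.Str.startswith path ("twag/web" ++ "/") || path == "twag/web") = true) := fun hh => e6 (h6.2 hh)
  simp [not_or] at n6
  by_cases e7 : pvHead path = "twag/models"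
  · have c7 := h7.1 e7
    simp at c7
    simp [n1, n2, n3, n4, n5, n6, c7, e7, hset]
  have n7 : ¬ ((PySem.Str.startswith path ("twag/models" ++ "/") || path == "twag/models") = true) := fun hh => e7 (h7.2 hh)
  simp [not_or] at n7
  rw [pv_modsLoop_eq]
  simp [n1, n2, n3, n4, n5, n6, n7, e1, e2, e3, e4, e5, e6, e7, hset, hmset, pvTopLevelModules]
  split_ifs <;> rfl
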